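-- pv_equiv track=rewrite | github.com/JohnYeu/gene_pathway_prediction | kegg_ml_pipeline/step9_filter_validate.py | _build_go_index
-- ===== SOURCE A (Python) =====
-- def _build_go_index(
--     gene_go: dict[str, set[str]],
--     all_go_terms: list[str],
-- ) -> dict[str, set[str]]:
--     """Build a GO-term → gene-set reverse index restricted to all_go_terms.
--
--     Pre-computing this index once and reusing it across all candidates reduces
--     the per-candidate GO enrichment test from O(|gene_go| × |all_go_terms|)
--     to O(|candidate_genes|) per term.
--
--     Args:
--         gene_go: Mapping from gene ID to its set of GO term IDs.
--         all_go_terms: Ordered list of GO terms used as features during training.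
--
--     Returns:
--         Dict mapping each GO term in all_go_terms to the set of genes annotated
--         with that term.
--     """
--     go_index: dict[str, set[str]] = {t: set() for t in all_go_terms}
--     for gene, terms in gene_go.items():
--         for t in terms:
--             if t in go_index:
--                 go_index[t].add(gene)
--     return go_index
-- ===== SOURCE B (Python) =====
-- def _build_go_index(
--     gene_go: dict[str, set[str]],
--     all_go_terms: list[str],
-- ) -> dict[str, set[str]]:
--     """Term-first construction: for each requested GO term, scan the
--     annotations once and collect the genes annotated with it."""
--     return {
--         t: {gene for gene, terms in gene_go.items() if t in terms}
--         for t in all_go_terms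
--     }
-- ===== Notes on version B (the rewrite author's own statement) =====
-- stated objective: alternative
-- what changed: Inverted the loop nesting: instead of one pass over all gene annotations guarded by a dict-key check, B builds the index term-first with a dict comprehension that, for each requested GO term, scans gene_go and collects the genes whose term set contains it.
import Mathlib
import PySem

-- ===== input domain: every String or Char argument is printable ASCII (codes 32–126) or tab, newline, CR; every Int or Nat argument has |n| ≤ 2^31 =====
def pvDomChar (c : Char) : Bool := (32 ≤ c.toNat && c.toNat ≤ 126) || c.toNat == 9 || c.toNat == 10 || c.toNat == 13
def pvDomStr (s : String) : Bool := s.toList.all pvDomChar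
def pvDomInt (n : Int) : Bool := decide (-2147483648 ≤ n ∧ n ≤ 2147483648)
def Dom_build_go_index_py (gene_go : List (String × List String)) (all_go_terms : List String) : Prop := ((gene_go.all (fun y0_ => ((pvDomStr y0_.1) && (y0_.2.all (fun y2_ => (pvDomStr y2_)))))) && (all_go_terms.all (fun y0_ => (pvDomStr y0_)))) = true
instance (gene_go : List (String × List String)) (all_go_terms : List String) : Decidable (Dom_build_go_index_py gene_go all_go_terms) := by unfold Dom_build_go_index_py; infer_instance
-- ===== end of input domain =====

-- B builds the index term-first (one scan of gene_go per requested term) instead of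
-- A's single annotation-first pass guarded by a dict-key check; same result, alternative algorithm.

-- ===== PORT A =====
def build_go_index_py (gene_go : List (String × List String)) (all_go_terms : List String) : List (String × List String) :=
  let go_index : PySem.Dict String (PySem.Set String) :=
    all_go_terms.foldl (fun d t => d.insert t PySem.Set.empty) PySem.Dict.empty
  (gene_go.foldl
    (fun d p => p.2.foldl
      (fun d t => if d.contains t then d.modify t PySem.Set.empty (fun s => PySem.Set.add s p.1) else d) d)
    go_index).items

-- ===== PORT B =====
-- the set comprehension {gene for gene, terms in gene_go.items() if t in terms}
def pvGenesFor (gene_go : List (String × List String)) (t : String) : PySem.Set String :=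
  gene_go.foldl (fun s p => if p.2.contains t then PySem.Set.add s p.1 else s) PySem.Set.empty

def build_go_index_py_alt (gene_go : List (String × List String)) (all_go_terms : List String) : List (String × List String) :=
  (all_go_terms.foldl (fun d t => d.insert t (pvGenesFor gene_go t)) PySem.Dict.empty).items

-- ===== PRECONDITION & SPEC =====
def Spec_build_go_index_py (gene_go : List (String × List String)) (all_go_terms : List String) (out : List (String × List String)) : Prop := out = build_go_index_py_alt gene_go all_go_terms
instance (gene_go : List (String × List String)) (all_go_terms : List String) (out : List (String × List String)) : Decidable (Spec_build_go_index_py gene_go all_go_terms out) := by unfold Spec_build_go_index_py; infer_instance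

-- ===== CLAIM (what is proved, stated in full; the proofs are below) =====
def Claim_equal_build_go_index_py : Prop := ∀ (gene_go : List (String × List String)) (all_go_terms : List String), Dom_build_go_index_py gene_go all_go_terms → Spec_build_go_index_py gene_go all_go_terms (build_go_index_py gene_go all_go_terms)

-- ===== LEMMAS AND PROOFS =====

-- membership test on a dict whose items are S keyed by identity
lemma pv_contains_mk_map (S : List String) (v : String → PySem.Set String) (t : String) :
    (PySem.Dict.mk (S.map (fun u => (u, v u)))).contains t = S.contains t := by
  rw [PySem.Dict.contains_mk, List.any_map]
  show S.any (fun u => u == t) = S.contains t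
  exact List.any_beq'

-- inserting a value computed from the key preserves the "map over keys" shape
lemma pv_insert_fn_step (S : List String) (v : String → PySem.Set String) (t : String) :
    (PySem.Dict.mk (S.map (fun u => (u, v u)))).insert t (v t)
      = PySem.Dict.mk ((PySem.Set.add S t).map (fun u => (u, v u))) := by
  by_cases h : t ∈ S
  · have hc : S.contains t = true := List.contains_iff_mem.mpr h
    apply PySem.Dict.ext
    rw [PySem.Dict.items_insert_of_contains _ _ (by rw [pv_contains_mk_map]; exact hc)]
    have hadd : PySem.Set.add S t = S := by simp [PySem.Set.add, h]
    rw [hadd]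
    show List.map _ (S.map _) = S.map _
    rw [List.map_map]
    apply List.map_congr_left
    intro u _
    by_cases hu : u = t
    · subst hu; simp
    · simp [hu]
  · have hc : S.contains t = false := by
      simpa [List.contains_iff_mem] using h
    apply PySem.Dict.ext
    rw [PySem.Dict.items_insert_of_not_contains _ _ (by rw [pv_contains_mk_map]; exact hc)]
    have hadd : PySem.Set.add S t = S ++ [t] := by simp [PySem.Set.add, h]
    show S.map _ ++ [(t, v t)] = (PySem.Set.add S t).map _
    rw [hadd, List.map_append]
    rfl

-- a foldl of inserts with key-derived values is the map over the deduped key list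
lemma pv_fold_insert_fn (v : String → PySem.Set String) (l : List String) :
    l.foldl (fun d t => d.insert t (v t)) PySem.Dict.empty
      = PySem.Dict.mk ((PySem.Set.ofList l).map (fun u => (u, v u))) := by
  induction l using List.reverseRecOn with
  | nil => rfl
  | append_singleton l t ih =>
    have hof : PySem.Set.ofList (l ++ [t]) = PySem.Set.add (PySem.Set.ofList l) t := by
      rw [PySem.Set.ofList_eq_foldl, List.foldl_append, List.foldl_cons, List.foldl_nil,
          ← PySem.Set.ofList_eq_foldl]
    rw [List.foldl_append, ih, List.foldl_cons, List.foldl_nil, pv_insert_fn_step, hof]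

-- A's inner loop over one gene's term list, on a dict in "map over keys" shape
lemma pv_inner_fold (g : String) (ts : List String) (S : List String) (hS : S.Nodup)
    (v : String → PySem.Set String) :
    ts.foldl (fun d t => if d.contains t then d.modify t PySem.Set.empty (fun s => PySem.Set.add s g) else d)
        (PySem.Dict.mk (S.map (fun u => (u, v u))))
      = PySem.Dict.mk (S.map (fun u => (u, if ts.contains u then PySem.Set.add (v u) g else v u))) := by
  induction ts using List.reverseRecOn with
  | nil => simp
  | append_singleton ts t0 ih =>
    rw [List.foldl_append, ih, List.foldl_cons, List.foldl_nil]
    by_cases h : t0 ∈ S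
    · have hc : S.contains t0 = true := List.contains_iff_mem.mpr h
      rw [if_pos (by rw [pv_contains_mk_map]; exact hc)]
      have hkeys : (PySem.Dict.mk (S.map (fun u => (u, if ts.contains u then PySem.Set.add (v u) g else v u)))).keys.Nodup := by
        rw [PySem.Dict.keys_mk, List.map_map]
        simpa [Function.comp_def] using hS
      have hget : (PySem.Dict.mk (S.map (fun u => (u, if ts.contains u then PySem.Set.add (v u) g else v u)))).getD t0 PySem.Set.empty
          = (if ts.contains t0 then PySem.Set.add (v t0) g else v t0) := by
        apply PySem.Dict.getD_of_mem_items _ _ hkeys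
        exact List.mem_map.mpr ⟨t0, h, rfl⟩
      rw [PySem.Dict.modify, hget]
      apply PySem.Dict.ext
      rw [PySem.Dict.items_insert_of_contains _ _ (by rw [pv_contains_mk_map]; exact hc)]
      show List.map _ (S.map _) = S.map _
      rw [List.map_map]
      apply List.map_congr_left
      intro u _
      by_cases hu : u = t0
      · subst hu
        by_cases hts : u ∈ ts <;>
          simp [List.mem_append, hts]
      · have hb : (u == t0) = false := by simpa using hu
        simp [List.mem_append, hu]
    · have hc : S.contains t0 = false := by simpa [List.contains_iff_mem] using h
      rw [if_neg (by rw [pv_contains_mk_map, hc]; simp)]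
      apply PySem.Dict.ext
      show S.map _ = S.map _
      apply List.map_congr_left
      intro u hu
      have hne : u ≠ t0 := fun c => h (c ▸ hu)
      simp [List.mem_append, hne]

-- A's outer loop over gene_go, on a dict in "map over keys" shape
lemma pv_outer_fold (gene_go : List (String × List String)) (S : List String) (hS : S.Nodup)
    (v : String → PySem.Set String) :
    gene_go.foldl
        (fun d p => p.2.foldl
          (fun d t => if d.contains t then d.modify t PySem.Set.empty (fun s => PySem.Set.add s p.1) else d) d)
        (PySem.Dict.mk (S.map (fun u => (u, v u))))
      = PySem.Dict.mk (S.map (fun u => (u, gene_go.foldl (fun s p => if p.2.contains u then PySem.Set.add s p.1 else s) (v u)))) := by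
  induction gene_go generalizing v with
  | nil => simp
  | cons p rest ih =>
    rw [List.foldl_cons, pv_inner_fold p.1 p.2 S hS v, ih]
    simp only [List.foldl_cons]

-- ===== VERDICT (by name: the statement is the Claim_ definition above) =====
theorem build_go_index_py_spec : Claim_equal_build_go_index_py := by
  intro gene_go all_go_terms _
  unfold Spec_build_go_index_py build_go_index_py build_go_index_py_alt
  simp only [pv_fold_insert_fn]
  rw [pv_outer_fold gene_go _ (PySem.Set.nodup_ofList all_go_terms) (fun _ => PySem.Set.empty)]
  simp [pvGenesFor]
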